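-- pv_equiv track=rewrite | github.com/alantao5056/USACO_Silver | 2017/January/2_hps/hps.py | getMaxWin
-- ===== SOURCE A (Python) =====
-- from collections import Counter
--
-- def getMaxWin(fj: list, N):
--   right = dict(Counter(fj))
--   left = {'H': 0, 'P': 0, 'S': 0}
--   bigCount = 0
--   for i in range(0, N):
--     right[fj[i]] -= 1
--     left[fj[i]] += 1
--     bigCount = max(bigCount, max(right.values()) + max(left.values()))
--   return bigCount
-- ===== SOURCE B (Python) =====
-- from collections import Counter
--
-- def getMaxWin(fj: list, N):
--   # two-pass: suffix-max table (full list, right-to-left), then one forward prefix scan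
--   if N <= 0:
--     return 0
--   c = Counter()
--   rmaxRev = [0]          # rmaxRev[t] = max count among the last t elements of fj
--   cmax = 0
--   for s in reversed(fj):
--     c[s] += 1
--     cmax = max(cmax, c[s])
--     rmaxRev.append(cmax)
--   rmax = rmaxRev[::-1]   # rmax[j] = max count in fj[j:], rmax[len(fj)] = 0
--   left = Counter()
--   lbest = 0
--   best = 0
--   for i in range(N):
--     x = fj[i]
--     left[x] += 1
--     lbest = max(lbest, left[x])
--     best = max(best, lbest + rmax[i + 1])
--   return best
-- ===== Notes on version B (the rewrite author's own statement) =====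
-- stated objective: faster
-- what changed: A rescans the whole counter dict (max(right.values()) + max(left.values())) on every loop iteration; B precomputes a suffix-max table in one right-to-left pass and then keeps running prefix maxima in a single forward pass, so each step is O(1).
import Mathlib
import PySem

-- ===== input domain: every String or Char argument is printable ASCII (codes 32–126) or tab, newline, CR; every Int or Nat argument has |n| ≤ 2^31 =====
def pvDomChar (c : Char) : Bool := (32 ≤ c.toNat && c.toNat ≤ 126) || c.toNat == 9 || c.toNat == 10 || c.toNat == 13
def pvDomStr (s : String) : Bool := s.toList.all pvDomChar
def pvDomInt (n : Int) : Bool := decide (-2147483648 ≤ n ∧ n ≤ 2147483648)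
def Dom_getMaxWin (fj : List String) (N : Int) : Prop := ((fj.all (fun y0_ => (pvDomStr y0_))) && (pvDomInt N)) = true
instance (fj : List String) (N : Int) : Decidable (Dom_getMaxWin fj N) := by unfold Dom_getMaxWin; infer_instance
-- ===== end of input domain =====

-- B replaces A's per-iteration scan of the whole counter dict (max(right.values())) by a
-- precomputed right-to-left suffix-max table plus one forward prefix scan with running maxima
-- (objective: faster per step by algorithm; not measured here).

-- ===== PORT A =====
-- Python's max(<list>) on a nonempty list; the [] case (0) is unreachable under Pre_ (A raises there)
def pyMaxD (l : List Int) : Int :=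
  match l with
  | [] => 0
  | h :: t => t.foldl max h

def getMaxWin (fj : List String) (N : Int) : Int :=
  -- right = dict(Counter(fj)); left = {'H':0,'P':0,'S':0}; bigCount = 0
  let st := (PySem.List.pyRange 0 N 1).foldl
    (fun (st : PySem.Dict String Int × PySem.Dict String Int × Int) i =>
      let x := PySem.List.pyGetD fj i ""      -- fj[i]; default unreachable under Pre_
      let r := st.1.modify x 0 (· - 1)        -- right[fj[i]] -= 1 (key present under Pre_)
      let l := st.2.1.modify x 0 (· + 1)      -- left[fj[i]] += 1 (key present under Pre_)
      (r, l, max st.2.2 (pyMaxD r.values + pyMaxD l.values)))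
    (PySem.Dict.counter fj, PySem.Dict.ofList [("H", 0), ("P", 0), ("S", 0)], 0)
  st.2.2

-- ===== PORT B =====
def getMaxWin_alt (fj : List String) (N : Int) : Int :=
  if N ≤ 0 then 0
  else
    -- suffix pass over reversed(fj): Counter c, rmaxRev grows by append
    let s1 := fj.reverse.foldl
      (fun (st : PySem.Dict String Int × List Int × Int) s =>
        let c := st.1.modify s 0 (· + 1)          -- c[s] += 1 (Counter: default 0)
        let cmax := max st.2.2 (c.getD s 0)       -- cmax = max(cmax, c[s])
        (c, st.2.1 ++ [cmax], cmax))
      (PySem.Dict.empty, [0], 0)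
    let rmax := s1.2.1.reverse                    -- rmax = rmaxRev[::-1]
    -- forward pass over range(N)
    let st := (PySem.List.pyRange 0 N 1).foldl
      (fun (st : PySem.Dict String Int × Int × Int) i =>
        let x := PySem.List.pyGetD fj i ""        -- x = fj[i]
        let l := st.1.modify x 0 (· + 1)          -- left[x] += 1
        let lbest := max st.2.1 (l.getD x 0)      -- lbest = max(lbest, left[x])
        let best := max st.2.2 (lbest + PySem.List.pyGetD rmax (i + 1) 0)
        (l, lbest, best))
      (PySem.Dict.empty, 0, 0)
    st.2.2

-- ===== PRECONDITION & SPEC =====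
-- Pre_ excludes exactly the inputs on which A raises: N > len(fj) (IndexError on fj[i]) and a
-- non-'H'/'P'/'S' string among fj[:N] (KeyError on left[fj[i]]).
def Pre_getMaxWin (fj : List String) (N : Int) : Prop :=
  N ≤ fj.length ∧ ∀ s ∈ fj.take N.toNat, s = "H" ∨ s = "P" ∨ s = "S"
instance (fj : List String) (N : Int) : Decidable (Pre_getMaxWin fj N) := by
  unfold Pre_getMaxWin; infer_instance

def pvWitness_getMaxWin : List String × Int := (["H", "P", "S", "H"], 3)

def Spec_getMaxWin (fj : List String) (N : Int) (out : Int) : Prop := out = getMaxWin_alt fj N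
instance (fj : List String) (N : Int) (out : Int) : Decidable (Spec_getMaxWin fj N out) := by unfold Spec_getMaxWin; infer_instance

-- ===== CLAIM (what is proved, stated in full; the proofs are below) =====
def Claim_equal_getMaxWin : Prop := ∀ (fj : List String) (N : Int), Dom_getMaxWin fj N → Pre_getMaxWin fj N → Spec_getMaxWin fj N (getMaxWin fj N)

-- ===== LEMMAS AND PROOFS =====

-- the common value both loops track: the largest multiplicity in l (0 for [])
def mcount (l : List String) : Int :=
  (PySem.Set.ofList l).foldl (fun m x => max m ((l.count x : Int))) 0

-- the common running best after k steps
def bigSpec (fj : List String) : Nat → Int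
  | 0 => 0
  | k + 1 => max (bigSpec fj k) (mcount (fj.drop (k + 1)) + mcount (fj.take (k + 1)))

theorem foldl_max_le (t : List Int) (a m : Int) (ha : a ≤ m) (h : ∀ y ∈ t, y ≤ m) :
    t.foldl max a ≤ m := by
  induction t generalizing a with
  | nil => exact ha
  | cons y t ih =>
    exact ih (max a y) (max_le ha (h y (by simp))) (fun z hz => h z (by simp [hz]))

theorem foldl_max_proj_le (S : List String) (f : String → Int) (a m : Int)
    (ha : a ≤ m) (h : ∀ x ∈ S, f x ≤ m) :
    S.foldl (fun acc x => max acc (f x)) a ≤ m := by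
  induction S generalizing a with
  | nil => exact ha
  | cons y t ih =>
    exact ih (max a (f y)) (max_le ha (h y (by simp))) (fun z hz => h z (by simp [hz]))

theorem pyMaxD_le (L : List Int) (m : Int) (h : ∀ y ∈ L, y ≤ m) (h0 : (0:Int) ≤ m) :
    pyMaxD L ≤ m := by
  cases L with
  | nil => exact h0
  | cons x t => exact foldl_max_le t x m (h x (by simp)) (fun y hy => h y (by simp [hy]))

theorem le_pyMaxD (L : List Int) (y : Int) (hy : y ∈ L) : y ≤ pyMaxD L := by
  cases L with
  | nil => simp at hy
  | cons x t =>
    rcases List.mem_cons.mp hy with h | h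
    · subst h; exact (PySem.List.le_foldl_max t y).1
    · exact (PySem.List.le_foldl_max t x).2 y h

theorem mcount_nonneg (l : List String) : 0 ≤ mcount l :=
  (PySem.List.le_foldl_max_int (PySem.Set.ofList l) (fun x => ((l.count x : Int))) 0).1

theorem count_le_mcount (l : List String) (x : String) : ((l.count x : Int)) ≤ mcount l := by
  by_cases hx : x ∈ l
  · exact (PySem.List.le_foldl_max_int (PySem.Set.ofList l) (fun x => ((l.count x : Int))) 0).2
      x (by rw [PySem.Set.mem_ofList]; exact hx)
  · simp [List.count_eq_zero_of_not_mem hx, mcount_nonneg]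

theorem pyMaxD_map_counts (S : List String) (l : List String) (hne : S ≠ [])
    (hsub : ∀ x ∈ l, x ∈ S) :
    pyMaxD (S.map fun x => ((l.count x : Int))) = mcount l := by
  apply le_antisymm
  · apply pyMaxD_le
    · intro y hy
      rcases List.mem_map.mp hy with ⟨x, _, rfl⟩
      exact count_le_mcount l x
    · exact mcount_nonneg l
  · apply foldl_max_proj_le
    · rcases List.exists_mem_of_ne_nil S hne with ⟨x0, hx0⟩
      calc (0:Int) ≤ ((l.count x0 : Int)) := by positivity
        _ ≤ _ := le_pyMaxD _ _ (List.mem_map.mpr ⟨x0, hx0, rfl⟩)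
    · intro x hx
      exact le_pyMaxD _ _ (List.mem_map.mpr ⟨x, hsub x ((PySem.Set.mem_ofList _ _).mp hx), rfl⟩)

theorem mcount_congr (l l' : List String) (h : ∀ x, l.count x = l'.count x) :
    mcount l = mcount l' := by
  have key : ∀ (a b : List String), (∀ x, a.count x = b.count x) → mcount a ≤ mcount b := by
    intro a b hab
    apply foldl_max_proj_le
    · exact mcount_nonneg b
    · intro x _
      rw [hab x]; exact count_le_mcount b x
  exact le_antisymm (key l l' h) (key l' l (fun x => (h x).symm))

theorem mcount_cons (s : String) (l : List String) :
    mcount (s :: l) = max (mcount l) (((s :: l).count s : Int)) := by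
  apply le_antisymm
  · apply foldl_max_proj_le
    · exact le_max_of_le_left (mcount_nonneg l)
    · intro x _
      by_cases hx : x = s
      · subst hx; exact le_max_right _ _
      · have : (s :: l).count x = l.count x := by
          simp [Ne.symm hx]
        rw [this]
        exact le_max_of_le_left (count_le_mcount l x)
  · apply max_le
    · apply foldl_max_proj_le
      · exact mcount_nonneg _
      · intro x _
        calc ((l.count x : Int)) ≤ ((s :: l).count x : Int) := by
              simp [List.count_cons]; omega
          _ ≤ mcount (s :: l) := count_le_mcount _ x
    · exact count_le_mcount (s :: l) s

-- getD through a subtract-one modify loop (mirror of PySem.Dict.getD_foldl_modify_add_one)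
theorem getD_foldl_modify_sub_one (l : List String) (d : PySem.Dict String Int) (v : String) :
    (l.foldl (fun d x => d.modify x 0 (· - 1)) d).getD v 0 = d.getD v 0 - l.count v := by
  induction l generalizing d with
  | nil => simp
  | cons x t ih =>
    rw [List.foldl_cons, ih, PySem.Dict.getD_modify, List.count_cons]
    by_cases hvx : v = x
    · simp [hvx]; ring
    · simp [hvx, Ne.symm hvx]

-- keys through the A-side modify loops stay the keys of the start dict when every
-- modified key is already present
theorem keys_foldl_modify_of_mem (l : List String) (d : PySem.Dict String Int) (f : Int → Int)
    (h : ∀ x ∈ l, x ∈ d.keys) :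
    (l.foldl (fun d x => d.modify x 0 f) d).keys = d.keys := by
  induction l generalizing d with
  | nil => rfl
  | cons x t ih =>
    have hk : (d.modify x 0 f).keys = d.keys := by
      rw [PySem.Dict.keys_modify, PySem.Dict.keys_insert_of_contains]
      exact (PySem.Dict.contains_iff_mem_keys _ _).mpr (h x (by simp))
    rw [List.foldl_cons, ih _ (fun y hy => by rw [hk]; exact h y (by simp [hy])), hk]

theorem ofList_ne_nil {l : List String} (h : l ≠ []) : PySem.Set.ofList l ≠ [] := by
  rcases List.exists_mem_of_ne_nil l h with ⟨x, hx⟩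
  intro hnil
  have := (PySem.Set.mem_ofList l x).mpr hx
  simp [hnil] at this

theorem A_right_max (fj : List String) (k : Nat) (hne : fj ≠ []) :
    pyMaxD ((fj.take k).foldl (fun d x => d.modify x 0 (· - 1)) (PySem.Dict.counter fj)).values
      = mcount (fj.drop k) := by
  set d := (fj.take k).foldl (fun d x => d.modify x 0 (· - 1)) (PySem.Dict.counter fj) with hd
  have hkeys : d.keys = PySem.Set.ofList fj := by
    rw [hd, keys_foldl_modify_of_mem]
    · exact PySem.Dict.keys_counter fj
    · intro x hx
      rw [PySem.Dict.keys_counter, PySem.Set.mem_ofList]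
      exact List.mem_of_mem_take hx
  have hnd : d.keys.Nodup := by rw [hkeys]; exact PySem.Set.nodup_ofList fj
  rw [PySem.Dict.values_eq_map_keys d hnd 0, hkeys]
  have hmap : (PySem.Set.ofList fj).map (fun x => d.getD x 0)
      = (PySem.Set.ofList fj).map (fun x => (((fj.drop k).count x : Nat) : Int)) := by
    apply List.map_congr_left
    intro x _
    rw [hd, getD_foldl_modify_sub_one, PySem.Dict.getD_counter]
    have hsplit : fj.count x = (fj.take k).count x + (fj.drop k).count x := by
      conv_lhs => rw [← List.take_append_drop k fj]
      exact List.count_append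
    rw [hsplit]; push_cast; ring
  rw [hmap]
  exact pyMaxD_map_counts _ _ (ofList_ne_nil hne)
    (fun x hx => (PySem.Set.mem_ofList fj x).mpr (List.mem_of_mem_drop hx))

theorem A_left_max (fj : List String) (k : Nat)
    (hp : ∀ s ∈ fj.take k, s = "H" ∨ s = "P" ∨ s = "S") :
    pyMaxD ((fj.take k).foldl (fun d x => d.modify x 0 (· + 1))
        (PySem.Dict.ofList [("H", 0), ("P", 0), ("S", 0)])).values
      = mcount (fj.take k) := by
  set d0 : PySem.Dict String Int := PySem.Dict.ofList [("H", 0), ("P", 0), ("S", 0)] with hd0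
  set d := (fj.take k).foldl (fun d x => d.modify x 0 (· + 1)) d0 with hd
  have hkeys0 : d0.keys = ["H", "P", "S"] := by decide
  have hkeys : d.keys = ["H", "P", "S"] := by
    rw [hd, keys_foldl_modify_of_mem]
    · exact hkeys0
    · intro x hx
      rw [hkeys0]
      rcases hp x hx with h | h | h <;> simp [h]
  have hnd : d.keys.Nodup := by rw [hkeys]; decide
  rw [PySem.Dict.values_eq_map_keys d hnd 0, hkeys]
  have hmap : (["H", "P", "S"] : List String).map (fun x => d.getD x 0)
      = (["H", "P", "S"] : List String).map (fun x => (((fj.take k).count x : Nat) : Int)) := by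
    apply List.map_congr_left
    intro x hx
    rw [hd, PySem.Dict.getD_foldl_modify_add_one]
    have : d0.getD x 0 = 0 := by
      fin_cases hx <;> decide
    rw [this, zero_add]
  rw [hmap]
  exact pyMaxD_map_counts _ _ (by simp) (fun x hx => by rcases hp x hx with h | h | h <;> simp [h])

theorem mcount_append_singleton (l : List String) (s : String) :
    mcount (l ++ [s]) = max (mcount l) (((l ++ [s]).count s : Int)) := by
  have hc : ∀ x : String, (l ++ [s]).count x = (s :: l).count x := by
    intro x
    by_cases h : x = s
    · subst h; simp [List.count_append]
    · simp [List.count_append, Ne.symm h]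
  rw [mcount_congr _ _ hc, mcount_cons, hc s]

theorem A_loop (fj : List String) (m : Nat) (hm : m ≤ fj.length)
    (hp : ∀ s ∈ fj.take m, s = "H" ∨ s = "P" ∨ s = "S") :
    (PySem.List.pyRange 0 (m : Int) 1).foldl
      (fun (st : PySem.Dict String Int × PySem.Dict String Int × Int) i =>
        let x := PySem.List.pyGetD fj i ""
        let r := st.1.modify x 0 (· - 1)
        let l := st.2.1.modify x 0 (· + 1)
        (r, l, max st.2.2 (pyMaxD r.values + pyMaxD l.values)))
      (PySem.Dict.counter fj, PySem.Dict.ofList [("H", 0), ("P", 0), ("S", 0)], 0)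
    = ((fj.take m).foldl (fun d x => d.modify x 0 (· - 1)) (PySem.Dict.counter fj),
       (fj.take m).foldl (fun d x => d.modify x 0 (· + 1)) (PySem.Dict.ofList [("H", 0), ("P", 0), ("S", 0)]),
       bigSpec fj m) := by
  induction m with
  | zero =>
    rw [show ((0 : Nat) : Int) = 0 by norm_num, PySem.List.pyRange_one_eq_nil (by norm_num)]
    rfl
  | succ m ih =>
    have hm' : m ≤ fj.length := Nat.le_of_succ_le hm
    have hmlt : m < fj.length := hm
    have hne : fj ≠ [] := List.ne_nil_of_length_pos (by omega)
    have hp1 : ∀ s ∈ fj.take (m + 1), s = "H" ∨ s = "P" ∨ s = "S" := hp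
    have hp' : ∀ s ∈ fj.take m, s = "H" ∨ s = "P" ∨ s = "S" := by
      intro s hs
      have heq : fj.take m = (fj.take (m + 1)).take m := by
        rw [List.take_take]; congr 1; omega
      exact hp s (List.mem_of_mem_take (by rw [← heq]; exact hs))
    have hcast : ((m + 1 : Nat) : Int) = (m : Int) + 1 := by push_cast; ring
    rw [hcast, PySem.List.pyRange_one_succ_right (by positivity), List.foldl_append, ih hm' hp']
    have hx : PySem.List.pyGetD fj (m : Int) "" = fj[m] := by
      rw [PySem.List.pyGetD_natCast, List.getD_eq_getElem fj "" hmlt]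
    have htake : fj.take (m + 1) = fj.take m ++ [fj[m]] := by
      rw [← List.take_concat_get hmlt, List.concat_eq_append]
    simp only [List.foldl_cons, List.foldl_nil, hx]
    rw [htake, List.foldl_append, List.foldl_append, List.foldl_cons, List.foldl_cons,
      List.foldl_nil, List.foldl_nil]
    refine Prod.ext rfl (Prod.ext rfl ?_)
    have hr := A_right_max fj (m + 1) hne
    have hl := A_left_max fj (m + 1) hp1
    rw [htake, List.foldl_append, List.foldl_cons, List.foldl_nil] at hr hl
    rw [hr, hl]
    dsimp only
    rw [← htake]
    rfl

theorem B_suffix (l : List String) :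
    l.foldl
      (fun (st : PySem.Dict String Int × List Int × Int) s =>
        let c := st.1.modify s 0 (· + 1)
        let cmax := max st.2.2 (c.getD s 0)
        (c, st.2.1 ++ [cmax], cmax))
      (PySem.Dict.empty, [0], 0)
    = (PySem.Dict.counter l,
       (List.range (l.length + 1)).map (fun t => mcount (l.take t)),
       mcount l) := by
  induction l using List.reverseRecOn with
  | nil => rfl
  | append_singleton l' s ih =>
    rw [List.foldl_append, ih, List.foldl_cons, List.foldl_nil]
    have hc : (PySem.Dict.counter l').modify s 0 (· + 1) = PySem.Dict.counter (l' ++ [s]) :=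
      (PySem.Dict.counter_append_singleton l' s).symm
    have hcnt : (PySem.Dict.counter (l' ++ [s])).getD s 0 = ((l' ++ [s]).count s : Int) := by
      rw [PySem.Dict.getD_counter]
    have hmax : max (mcount l') (((l' ++ [s]).count s : Int)) = mcount (l' ++ [s]) :=
      (mcount_append_singleton l' s).symm
    simp only [hc, hcnt, hmax]
    refine Prod.ext rfl (Prod.ext ?_ ?_)
    · show (List.range (l'.length + 1)).map (fun t => mcount (l'.take t)) ++ [mcount (l' ++ [s])]
        = (List.range ((l' ++ [s]).length + 1)).map (fun t => mcount ((l' ++ [s]).take t))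
      have hlen : (l' ++ [s]).length + 1 = (l'.length + 1) + 1 := by simp
      conv_rhs => rw [hlen, List.range_succ, List.map_append]
      congr 1
      · apply List.map_congr_left
        intro t ht
        have ht' : t ≤ l'.length := by
          have := List.mem_range.mp ht; omega
        rw [List.take_append_of_le_length ht']
      · simp only [List.map_cons, List.map_nil]
        rw [List.take_of_length_le (by simp)]
    · rfl

theorem rmax_get (fj : List String) (k : Nat) (hk : k < fj.length) :
    PySem.List.pyGetD
      (((List.range (fj.reverse.length + 1)).map (fun t => mcount (fj.reverse.take t))).reverse)
      ((k : Int) + 1) 0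
      = mcount (fj.drop (k + 1)) := by
  have hlenrev : fj.reverse.length = fj.length := by simp
  have hcast : ((k : Int) + 1) = ((k + 1 : Nat) : Int) := by push_cast; ring
  have hlen : (((List.range (fj.reverse.length + 1)).map
      (fun t => mcount (fj.reverse.take t))).reverse).length = fj.length + 1 := by
    simp [hlenrev]
  rw [hcast, PySem.List.pyGetD_natCast, List.getD_eq_getElem _ _ (by rw [hlen]; omega),
    List.getElem_reverse]
  simp only [List.length_map, List.length_range, List.getElem_map, List.getElem_range, hlenrev]
  have hidx : fj.length + 1 - 1 - (k + 1) = fj.length - (k + 1) := by omega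
  rw [hidx, List.take_reverse]
  have hidx2 : fj.length - (fj.length - (k + 1)) = k + 1 := by omega
  rw [hidx2]
  exact mcount_congr _ _ (fun x => List.count_reverse)

theorem B_loop (fj : List String) (rmax : List Int) (m : Nat) (hm : m ≤ fj.length)
    (hr : ∀ k : Nat, k < m → PySem.List.pyGetD rmax ((k : Int) + 1) 0 = mcount (fj.drop (k + 1))) :
    (PySem.List.pyRange 0 (m : Int) 1).foldl
      (fun (st : PySem.Dict String Int × Int × Int) i =>
        let x := PySem.List.pyGetD fj i ""
        let l := st.1.modify x 0 (· + 1)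
        let lbest := max st.2.1 (l.getD x 0)
        let best := max st.2.2 (lbest + PySem.List.pyGetD rmax (i + 1) 0)
        (l, lbest, best))
      (PySem.Dict.empty, 0, 0)
    = (PySem.Dict.counter (fj.take m), mcount (fj.take m), bigSpec fj m) := by
  induction m with
  | zero =>
    rw [show ((0 : Nat) : Int) = 0 by norm_num, PySem.List.pyRange_one_eq_nil (by norm_num)]
    rfl
  | succ m ih =>
    have hm' : m ≤ fj.length := Nat.le_of_succ_le hm
    have hmlt : m < fj.length := hm
    have hcast : ((m + 1 : Nat) : Int) = (m : Int) + 1 := by push_cast; ring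
    rw [hcast, PySem.List.pyRange_one_succ_right (by positivity), List.foldl_append,
      ih hm' (fun k hk => hr k (by omega))]
    have hx : PySem.List.pyGetD fj (m : Int) "" = fj[m] := by
      rw [PySem.List.pyGetD_natCast, List.getD_eq_getElem fj "" hmlt]
    have htake : fj.take (m + 1) = fj.take m ++ [fj[m]] := by
      rw [← List.take_concat_get hmlt, List.concat_eq_append]
    simp only [List.foldl_cons, List.foldl_nil, hx]
    have hc : (PySem.Dict.counter (fj.take m)).modify fj[m] 0 (· + 1)
        = PySem.Dict.counter (fj.take (m + 1)) := by
      rw [htake]; exact (PySem.Dict.counter_append_singleton _ _).symm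
    have hlb : max (mcount (fj.take m)) ((PySem.Dict.counter (fj.take (m + 1))).getD fj[m] 0)
        = mcount (fj.take (m + 1)) := by
      rw [PySem.Dict.getD_counter, htake]
      exact (mcount_append_singleton _ _).symm
    simp only [hc, hlb, hr m (by omega)]
    refine Prod.ext rfl (Prod.ext rfl ?_)
    show max (bigSpec fj m) (mcount (fj.take (m + 1)) + mcount (fj.drop (m + 1))) = bigSpec fj (m + 1)
    rw [add_comm]
    rfl

theorem A_eq_bigSpec (fj : List String) (N : Int) (hpre : Pre_getMaxWin fj N) :
    getMaxWin fj N = bigSpec fj N.toNat := by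
  obtain ⟨hN, hp⟩ := hpre
  simp only [getMaxWin]
  by_cases h0 : N ≤ 0
  · rw [PySem.List.pyRange_one_eq_nil h0, show N.toNat = 0 by omega]
    rfl
  · have hNt : (N.toNat : Int) = N := Int.toNat_of_nonneg (by omega)
    have hlen : N.toNat ≤ fj.length := by omega
    rw [← hNt, A_loop fj N.toNat hlen hp]
    simp
    congr 1
    omega

theorem B_eq_bigSpec (fj : List String) (N : Int) (hpre : Pre_getMaxWin fj N) :
    getMaxWin_alt fj N = bigSpec fj N.toNat := by
  obtain ⟨hN, hp⟩ := hpre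
  by_cases h0 : N ≤ 0
  · simp only [getMaxWin_alt, if_pos h0]
    rw [show N.toNat = 0 by omega]
    rfl
  · simp only [getMaxWin_alt, if_neg h0]
    rw [B_suffix fj.reverse]
    have hNt : (N.toNat : Int) = N := Int.toNat_of_nonneg (by omega)
    have hlen : N.toNat ≤ fj.length := by omega
    rw [← hNt, B_loop fj _ N.toNat hlen (fun k hk => rmax_get fj k (by omega))]
    simp
    congr 1
    omega

-- ===== VERDICT (by name: the statement is the Claim_ definition above) =====
theorem getMaxWin_spec : Claim_equal_getMaxWin := by
  intro fj N _ hpre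
  unfold Spec_getMaxWin
  rw [A_eq_bigSpec fj N hpre, B_eq_bigSpec fj N hpre]
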